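-- pv_equiv track=rewrite | github.com/jemorriso/PySBR | pysbr/queries/lines.py | _tally_points
-- ===== SOURCE A (Python) =====
-- import copy
-- from typing import List, Dict, Union, Tuple
--
-- def _tally_points(
--
--     line: List[Dict],
--     period_scores: List[Dict[str, int]],
--     market_range: List[int],
-- ) -> Tuple[int, int]:
--     """Sum up the points scored over the range of interest, according to the market
--     in question.
--
--     If the market is a total, the return is of the form (total, []). Otherwise, the
--     return looks like (points_scored_by_team, points_scored_by_other_team).
--     """
--     scores = copy.deepcopy(period_scores)
--     # TODO: check that len scores == market range (current and future events)
--     if market_range is not None: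
--         scores = [s for s in period_scores if s.get("period") in market_range]
--
--     participant_id = line.get("participant id")
--     o_scores = []
--     if participant_id not in [15143, 15144]:
--         scores = [
--             s for s in period_scores if s.get("participant id") == participant_id
--         ]
--         o_scores = [
--             s for s in period_scores if s.get("participant id") != participant_id
--         ]
--
--     try:
--         return sum([s.get("points scored") for s in scores]), sum(
--             [s.get("points scored") for s in o_scores]
--         )
--     except TypeError:
--         return None, None
-- ===== SOURCE B (Python) =====
-- def _tally_points(line, period_scores, market_range):
--     participant_id = line.get("participant id")
--     is_total = participant_id in (15143, 15144)
--     total = 0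
--     other = 0
--     for s in period_scores:
--         pts = s.get("points scored")
--         if is_total:
--             if market_range is None or s.get("period") in market_range:
--                 if pts is None:
--                     return None, None
--                 total += pts
--         else:
--             if pts is None:
--                 return None, None
--             if s.get("participant id") == participant_id:
--                 total += pts
--             else:
--                 other += pts
--     return total, other
-- ===== Notes on version B (the rewrite author's own statement) =====
-- stated objective: alternative
-- what changed: A builds up to four filtered copies of period_scores with list comprehensions and then runs two sum() calls inside a try/except; B makes a single pass over period_scores with two running accumulators (total/other), classifying each score dict on the fly and returning (None, None) as soon as a selected score lacks 'points scored'.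
import Mathlib
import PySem

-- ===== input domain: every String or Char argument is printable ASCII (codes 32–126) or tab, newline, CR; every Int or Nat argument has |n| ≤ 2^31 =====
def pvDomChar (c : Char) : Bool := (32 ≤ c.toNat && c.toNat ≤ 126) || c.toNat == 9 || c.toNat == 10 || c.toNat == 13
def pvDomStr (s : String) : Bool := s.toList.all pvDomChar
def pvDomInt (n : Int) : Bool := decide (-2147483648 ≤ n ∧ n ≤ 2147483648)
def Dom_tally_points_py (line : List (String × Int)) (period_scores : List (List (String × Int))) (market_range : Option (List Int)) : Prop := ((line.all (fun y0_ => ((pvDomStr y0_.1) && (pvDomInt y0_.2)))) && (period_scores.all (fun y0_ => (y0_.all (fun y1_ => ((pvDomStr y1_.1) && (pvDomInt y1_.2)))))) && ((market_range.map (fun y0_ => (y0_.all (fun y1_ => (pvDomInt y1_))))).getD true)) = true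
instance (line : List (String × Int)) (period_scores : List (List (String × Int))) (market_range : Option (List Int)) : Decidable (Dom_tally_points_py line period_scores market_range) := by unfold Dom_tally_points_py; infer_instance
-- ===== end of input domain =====

-- B replaces A's four filter-comprehensions + two sums by a single pass with two running
-- accumulators and an early (None, None) return; same values, different decomposition ("alternative").

-- ===== PORT A =====

-- dict.get(k): first match in the association list (exact for the dict convention)
def pvGet (d : List (String × Int)) (k : String) : Option Int :=
  (d.find? (fun p => p.1 == k)).map (·.2)

-- s.get("period") in market_range  (None in a list of ints is False) — the condition
-- both Pythons write literally; shared helper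
def pvInPeriod (r : List Int) (s : List (String × Int)) : Bool :=
  match pvGet s "period" with
  | some p => r.contains p
  | none => false

-- sum([...]) over a list that may contain None: Python raises TypeError on any None,
-- otherwise left-folds +. `none` here is exactly the TypeError case.
def pvSum (xs : List (Option Int)) : Option Int :=
  xs.foldl (fun acc x =>
    match acc, x with
    | some a, some v => some (a + v)
    | _, _ => none) (some 0)

def tally_points_py (line : List (String × Int)) (period_scores : List (List (String × Int))) (market_range : Option (List Int)) : Option Int × Option Int :=
  -- scores = deepcopy(period_scores); if market_range is not None: filter by period
  let scores0 : List (List (String × Int)) :=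
    match market_range with
    | none => period_scores
    | some r => period_scores.filter (pvInPeriod r)
  let participant_id := pvGet line "participant id"
  let notTotal := !(participant_id == some 15143 || participant_id == some 15144)
  let scores := if notTotal
    then period_scores.filter (fun s => pvGet s "participant id" == participant_id)
    else scores0
  let o_scores := if notTotal
    then period_scores.filter (fun s => !(pvGet s "participant id" == participant_id))
    else ([] : List (List (String × Int)))
  -- try: return sum(...), sum(...) except TypeError: return None, None
  match pvSum (scores.map (fun s => pvGet s "points scored")),
        pvSum (o_scores.map (fun s => pvGet s "points scored")) with
  | some a, some b => (some a, some b)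
  | _, _ => (none, none)

-- ===== PORT B =====

-- market_range is None or s.get("period") in market_range
def pvIncl (mr : Option (List Int)) (s : List (String × Int)) : Bool :=
  match mr with
  | none => true
  | some r => pvInPeriod r s

-- the for-loop of Source B: early return on a missing "points scored", else accumulate
def altLoop (pid : Option Int) (isTotal : Bool) (mr : Option (List Int)) :
    List (List (String × Int)) → Int → Int → Option Int × Option Int
  | [], total, other => (some total, some other)
  | s :: rest, total, other =>
    let pts := pvGet s "points scored"
    if isTotal then
      if pvIncl mr s then
        match pts with
        | none => (none, none)
        | some p => altLoop pid isTotal mr rest (total + p) other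
      else altLoop pid isTotal mr rest total other
    else
      match pts with
      | none => (none, none)
      | some p =>
        if pvGet s "participant id" == pid then
          altLoop pid isTotal mr rest (total + p) other
        else
          altLoop pid isTotal mr rest total (other + p)

def tally_points_py_alt (line : List (String × Int)) (period_scores : List (List (String × Int))) (market_range : Option (List Int)) : Option Int × Option Int :=
  let participant_id := pvGet line "participant id"
  let isTotal := participant_id == some 15143 || participant_id == some 15144
  altLoop participant_id isTotal market_range period_scores 0 0

-- ===== PRECONDITION & SPEC =====
def Spec_tally_points_py (line : List (String × Int)) (period_scores : List (List (String × Int))) (market_range : Option (List Int)) (out : Option Int × Option Int) : Prop := out = tally_points_py_alt line period_scores market_range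
instance (line : List (String × Int)) (period_scores : List (List (String × Int))) (market_range : Option (List Int)) (out : Option Int × Option Int) : Decidable (Spec_tally_points_py line period_scores market_range out) := by unfold Spec_tally_points_py; infer_instance

-- ===== CLAIM (what is proved, stated in full; the proofs are below) =====
def Claim_equal_tally_points_py : Prop := ∀ (line : List (String × Int)) (period_scores : List (List (String × Int))) (market_range : Option (List Int)), Dom_tally_points_py line period_scores market_range → Spec_tally_points_py line period_scores market_range (tally_points_py line period_scores market_range)

-- ===== LEMMAS AND PROOFS =====

theorem pvSum_foldl_none (xs : List (Option Int)) :
    xs.foldl (fun acc x =>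
      match acc, x with
      | some a, some v => some (a + v)
      | _, _ => none) none = none := by
  induction xs with
  | nil => rfl
  | cons x xs ih => cases x <;> simpa [List.foldl] using ih

theorem pvSum_foldl_shift (xs : List (Option Int)) (a : Int) :
    xs.foldl (fun acc x =>
      match acc, x with
      | some a, some v => some (a + v)
      | _, _ => none) (some a) = (pvSum xs).map (a + ·) := by
  induction xs generalizing a with
  | nil => simp [pvSum]
  | cons x xs ih =>
    cases x with
    | none => simp [pvSum, List.foldl, pvSum_foldl_none]
    | some v =>
      simp only [List.foldl, pvSum]
      rw [ih, ih]
      cases h : pvSum xs with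
      | none => simp [pvSum] at h; simp [h]
      | some s =>
        simp [pvSum] at h; simp [h]
        ring

theorem pvSum_cons (x : Option Int) (xs : List (Option Int)) :
    pvSum (x :: xs) =
      match x, pvSum xs with
      | some v, some s => some (v + s)
      | _, _ => none := by
  cases x with
  | none => simp [pvSum, pvSum_foldl_none]
  | some v =>
    show List.foldl _ (some (0 + v)) xs = _
    rw [pvSum_foldl_shift]
    cases h : pvSum xs <;> simp [Int.add_comm]

-- total-market loop: scores filtered by pvIncl, other accumulator untouched
theorem altLoop_total (pid : Option Int) (mr : Option (List Int))
    (ps : List (List (String × Int))) (t o : Int) :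
    altLoop pid true mr ps t o =
      match pvSum ((ps.filter (pvIncl mr)).map (fun s => pvGet s "points scored")) with
      | some a => (some (t + a), some o)
      | none => (none, none) := by
  induction ps generalizing t o with
  | nil => simp [altLoop, pvSum]
  | cons s rest ih =>
    simp only [altLoop]
    by_cases hin : pvIncl mr s = true
    · rw [List.filter_cons_of_pos hin]
      cases hp : pvGet s "points scored" with
      | none => simp [hin, hp, pvSum_cons]
      | some v =>
        simp only [hin, if_pos, hp]
        rw [ih, List.map_cons, pvSum_cons, hp]
        cases h : pvSum ((rest.filter _).map _) <;> simp <;> ring_nf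
    · rw [List.filter_cons_of_neg hin]
      simp only [hin, Bool.false_eq_true, if_false]
      exact ih t o
      
-- non-total loop: split every element by participant id, market_range ignored
theorem altLoop_nontotal (pid : Option Int) (mr : Option (List Int))
    (ps : List (List (String × Int))) (t o : Int) :
    altLoop pid false mr ps t o =
      match pvSum ((ps.filter (fun s => pvGet s "participant id" == pid)).map
              (fun s => pvGet s "points scored")),
            pvSum ((ps.filter (fun s => !(pvGet s "participant id" == pid))).map
              (fun s => pvGet s "points scored")) with
      | some a, some b => (some (t + a), some (o + b))
      | _, _ => (none, none) := by
  induction ps generalizing t o with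
  | nil => simp [altLoop, pvSum]
  | cons s rest ih =>
    simp only [altLoop, List.filter_cons]
    cases hp : pvGet s "points scored" with
    | none =>
      by_cases hid : (pvGet s "participant id" == pid) = true
      · simp only [hid, Bool.not_true, Bool.false_eq_true, if_true, if_false, hp,
          List.map_cons, pvSum_cons]
        try simp [hp]
      · simp only [hid, Bool.not_false, Bool.false_eq_true, if_true, if_false, hp,
          List.map_cons, pvSum_cons]
        try simp [hp]
    | some v =>
      by_cases hid : (pvGet s "participant id" == pid) = true
      · simp only [hid, Bool.not_true, Bool.false_eq_true, if_true, if_false, hp,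
          List.map_cons, pvSum_cons]
        rw [ih]
        cases pvSum ((rest.filter fun s => pvGet s "participant id" == pid).map
            fun s => pvGet s "points scored") <;>
          cases pvSum ((rest.filter fun s => !(pvGet s "participant id" == pid)).map
            fun s => pvGet s "points scored") <;>
            simp <;> ring_nf
      · simp only [hid, Bool.not_false, Bool.false_eq_true, if_true, if_false, hp,
          List.map_cons, pvSum_cons]
        rw [ih]
        cases pvSum ((rest.filter fun s => pvGet s "participant id" == pid).map
            fun s => pvGet s "points scored") <;>
          cases pvSum ((rest.filter fun s => !(pvGet s "participant id" == pid)).map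
            fun s => pvGet s "points scored") <;>
            simp <;> ring_nf

-- A's scores0 is exactly B's pvIncl filter
theorem scores0_eq_incl_filter (ps : List (List (String × Int))) (mr : Option (List Int)) :
    (match mr with
      | none => ps
      | some r => ps.filter (pvInPeriod r)) = ps.filter (pvIncl mr) := by
  cases mr with
  | none => exact (List.filter_eq_self.mpr (fun a _ => rfl)).symm
  | some r => rfl

-- ===== VERDICT (by name: the statement is the Claim_ definition above) =====
theorem tally_points_py_spec : Claim_equal_tally_points_py := by
  intro line ps mr _
  unfold Spec_tally_points_py tally_points_py tally_points_py_alt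
  by_cases htot : (pvGet line "participant id" == some 15143 ||
      pvGet line "participant id" == some 15144) = true
  · simp only [htot, Bool.not_true, Bool.false_eq_true, if_false]
    rw [altLoop_total, scores0_eq_incl_filter]
    cases pvSum ((ps.filter (pvIncl mr)).map fun s => pvGet s "points scored") <;>
      simp [pvSum]
  · simp only [htot, Bool.not_false, if_true, if_pos]
    rw [altLoop_nontotal]
    cases pvSum ((ps.filter fun s => pvGet s "participant id" == pvGet line "participant id").map fun s => pvGet s "points scored") <;>
      cases pvSum ((ps.filter fun s => !(pvGet s "participant id" == pvGet line "participant id")).map fun s => pvGet s "points scored") <;>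
        simp
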